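-- pv_equiv track=rewrite | github.com/b0931866529/bingo | 539_calcu/calcu.py | ballToMark
-- ===== SOURCE A (Python) =====
-- def ballToMark(ball: str) -> str:
--     """
--     依照球號排序
--     """
--     if any(ball == n for n in ['01', '11']):
--         return '小一'
--     if any(ball == n for n in ['02', '12']):
--         return '小二'
--     if any(ball == n for n in ['03', '13']):
--         return '小三'
--     if any(ball == n for n in ['04', '14']):
--         return '小四'
--     if any(ball == n for n in ['05', '15']):
--         return '小五'
--
--     if any(ball == n for n in ['21', '31']):
--         return '大一'
--     if any(ball == n for n in ['22', '32']):
--         return '大二'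
--     if any(ball == n for n in ['23', '33']):
--         return '大三'
--     if any(ball == n for n in ['24', '34']):
--         return '大四'
--     if any(ball == n for n in ['25', '35']):
--         return '大五'
--
--     if any(ball == n for n in ['06', '16']):
--         return '小六'
--     if any(ball == n for n in ['07', '17']):
--         return '小七'
--     if any(ball == n for n in ['08', '18']):
--         return '小八'
--     if any(ball == n for n in ['09', '19']):
--         return '小九'
--
--     if any(ball == n for n in ['26', '36']):
--         return '大六'
--     if any(ball == n for n in ['27', '37']):
--         return '大七'
--     if any(ball == n for n in ['28', '38']):
--         return '大八'
--     if any(ball == n for n in ['29', '39']):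
--         return '大九'
--
--     if any(ball == n for n in ['10', '20', '30']):
--         return '零'
--     return ''
-- ===== SOURCE B (Python) =====
-- NAMES = ['', '一', '二', '三', '四', '五', '六', '七', '八', '九']
--
-- def ballToMark(ball: str) -> str:
--     if len(ball) != 2 or any(c not in '0123456789' for c in ball):
--         return ''
--     tens = int(ball[0])
--     units = int(ball[1])
--     if units == 0:
--         return '零' if tens in (1, 2, 3) else ''
--     if tens in (0, 1):
--         return '小' + NAMES[units]
--     if tens in (2, 3):
--         return '大' + NAMES[units]
--     return ''
-- ===== Notes on version B (the rewrite author's own statement) =====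
-- stated objective: simpler
-- what changed: Replaces A's 39 hand-enumerated string comparisons across 19 if-branches with one arithmetic rule: validate that the input is exactly two ASCII digit characters, split into tens and units, and build the label from a size prefix ('小' for tens 0-1, '大' for tens 2-3, '零' for units 0 with tens 1-3) plus a units-name lookup table.
import Mathlib
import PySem

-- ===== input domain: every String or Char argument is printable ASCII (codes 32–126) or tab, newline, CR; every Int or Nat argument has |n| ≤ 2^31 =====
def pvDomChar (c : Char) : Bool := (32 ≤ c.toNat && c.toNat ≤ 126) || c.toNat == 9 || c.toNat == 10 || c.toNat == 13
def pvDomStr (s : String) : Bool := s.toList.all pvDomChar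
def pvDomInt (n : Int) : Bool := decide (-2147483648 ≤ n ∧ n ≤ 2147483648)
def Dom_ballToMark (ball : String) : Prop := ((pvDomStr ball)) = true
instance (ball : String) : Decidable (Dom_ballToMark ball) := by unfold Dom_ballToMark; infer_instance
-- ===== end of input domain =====

-- B replaces A's 39 hand-enumerated string comparisons by one arithmetic rule:
-- validate the two digit characters, split into tens and units, and compose the
-- label from a size prefix and a units-name table (objective: simpler).

-- ===== PORT A =====
-- literal transliteration of A's if-chain; `any(ball == n for n in [x, y])` is the disjunction `ball = x ∨ ball = y`
def ballToMark (ball : String) : String :=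
  if ball = "01" ∨ ball = "11" then "小一"
  else if ball = "02" ∨ ball = "12" then "小二"
  else if ball = "03" ∨ ball = "13" then "小三"
  else if ball = "04" ∨ ball = "14" then "小四"
  else if ball = "05" ∨ ball = "15" then "小五"
  else if ball = "21" ∨ ball = "31" then "大一"
  else if ball = "22" ∨ ball = "32" then "大二"
  else if ball = "23" ∨ ball = "33" then "大三"
  else if ball = "24" ∨ ball = "34" then "大四"
  else if ball = "25" ∨ ball = "35" then "大五"
  else if ball = "06" ∨ ball = "16" then "小六"
  else if ball = "07" ∨ ball = "17" then "小七"
  else if ball = "08" ∨ ball = "18" then "小八"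
  else if ball = "09" ∨ ball = "19" then "小九"
  else if ball = "26" ∨ ball = "36" then "大六"
  else if ball = "27" ∨ ball = "37" then "大七"
  else if ball = "28" ∨ ball = "38" then "大八"
  else if ball = "29" ∨ ball = "39" then "大九"
  else if ball = "10" ∨ ball = "20" ∨ ball = "30" then "零"
  else ""

-- ===== PORT B =====
-- NAMES table of Source B
def pvNames : List String := ["", "一", "二", "三", "四", "五", "六", "七", "八", "九"]
-- the string '0123456789' that Source B tests membership in
def pvDigits : List Char := ['0', '1', '2', '3', '4', '5', '6', '7', '8', '9']

def ballToMark_alt (ball : String) : String :=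
  -- `len(ball) != 2 or any(c not in '0123456789' for c in ball)` = the match guard below
  match ball.toList with
  | [c1, c2] =>
    if c1 ∈ pvDigits ∧ c2 ∈ pvDigits then
      -- int(ball[0]) / int(ball[1]): exact on single digit chars (code − 48)
      let tens : Nat := c1.toNat - 48
      let units : Nat := c2.toNat - 48
      if units = 0 then (if tens = 1 ∨ tens = 2 ∨ tens = 3 then "零" else "")
      else if tens = 0 ∨ tens = 1 then "小" ++ pvNames.getD units ""  -- NAMES[units]: units ≤ 9, in range
      else if tens = 2 ∨ tens = 3 then "大" ++ pvNames.getD units ""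
      else ""
    else ""
  | _ => ""

-- ===== PRECONDITION & SPEC =====
def Spec_ballToMark (ball : String) (out : String) : Prop := out = ballToMark_alt ball
instance (ball : String) (out : String) : Decidable (Spec_ballToMark ball out) := by unfold Spec_ballToMark; infer_instance

-- ===== CLAIM (what is proved, stated in full; the proofs are below) =====
def Claim_equal_ballToMark : Prop := ∀ (ball : String), Dom_ballToMark ball → Spec_ballToMark ball (ballToMark ball)

-- ===== LEMMAS AND PROOFS =====

-- every Char is one of the ten digit characters or none of them
theorem pvCharCases (c : Char) :
    c = '0' ∨ c = '1' ∨ c = '2' ∨ c = '3' ∨ c = '4' ∨ c = '5' ∨ c = '6' ∨ c = '7' ∨ c = '8' ∨ c = '9' ∨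
    (c ≠ '0' ∧ c ≠ '1' ∧ c ≠ '2' ∧ c ≠ '3' ∧ c ≠ '4' ∧ c ≠ '5' ∧ c ≠ '6' ∧ c ≠ '7' ∧ c ≠ '8' ∧ c ≠ '9') := by
  by_cases h : c ∈ pvDigits
  · simp [pvDigits] at h; tauto
  · simp [pvDigits] at h; tauto

-- ===== VERDICT (by name: the statement is the Claim_ definition above) =====
theorem ballToMark_spec : Claim_equal_ballToMark := by
  intro ball _
  unfold Spec_ballToMark
  obtain ⟨l, rfl⟩ : ∃ l, ball = String.ofList l := ⟨ball.toList, String.ofList_toList.symm⟩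
  rcases l with _ | ⟨c1, _ | ⟨c2, _ | ⟨c3, t⟩⟩⟩
  · decide
  · simp [ballToMark, ballToMark_alt, String.ofList_eq]
  · rcases pvCharCases c1 with rfl | rfl | rfl | rfl | rfl | rfl | rfl | rfl | rfl | rfl | h1 <;>
      rcases pvCharCases c2 with rfl | rfl | rfl | rfl | rfl | rfl | rfl | rfl | rfl | rfl | h2 <;>
      first
        | decide
        | simp [ballToMark, ballToMark_alt, String.ofList_eq, pvDigits, h1]
        | simp [ballToMark, ballToMark_alt, String.ofList_eq, pvDigits, h2]
  · simp [ballToMark, ballToMark_alt, String.ofList_eq]
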